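-- pv_equiv track=rewrite | github.com/varsha2611/Water-Network-Generation-and-Optimization | my_algorithm.py | nodes_in_K_graph
-- ===== SOURCE A (Python) =====
-- from collections import OrderedDict
--
-- def nodes_in_K_graph(K_edges):
--     nodes = {}
--     for edge in K_edges:
--         nodes[edge[0]] = 0
--         nodes[edge[1]] = 0
--     for edge in K_edges:
--         nodes[edge[0]]+=1
--         nodes[edge[1]]+=1
--     nodes_sorted = OrderedDict(sorted(nodes.items(), key=lambda x: x[1], reverse=True))
--     main_nodes=[]
--     for node in nodes_sorted:
--         if nodes_sorted[node]>2:
--             main_nodes.append(node)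
--         else:
--             break
--     return main_nodes
-- ===== SOURCE B (Python) =====
-- def nodes_in_K_graph(K_edges):
--     deg = {}
--     for u, v in K_edges:
--         deg[u] = deg.get(u, 0) + 1
--         deg[v] = deg.get(v, 0) + 1
--     if not deg:
--         return []
--     buckets = {}
--     for node, d in deg.items():
--         buckets.setdefault(d, []).append(node)
--     result = []
--     for d in range(max(buckets), 2, -1):
--         result.extend(buckets.get(d, []))
--     return result
-- ===== Notes on version B (the rewrite author's own statement) =====
-- stated objective: alternative
-- what changed: B replaces A's comparison sort of the degree dict plus break-on-first-low-degree loop by a bucket table mapping each degree to its nodes (in first-appearance order) scanned from the maximum degree down to 3, i.e. a counting/bucket-sort pass instead of sorted()+break.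
import Mathlib
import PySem

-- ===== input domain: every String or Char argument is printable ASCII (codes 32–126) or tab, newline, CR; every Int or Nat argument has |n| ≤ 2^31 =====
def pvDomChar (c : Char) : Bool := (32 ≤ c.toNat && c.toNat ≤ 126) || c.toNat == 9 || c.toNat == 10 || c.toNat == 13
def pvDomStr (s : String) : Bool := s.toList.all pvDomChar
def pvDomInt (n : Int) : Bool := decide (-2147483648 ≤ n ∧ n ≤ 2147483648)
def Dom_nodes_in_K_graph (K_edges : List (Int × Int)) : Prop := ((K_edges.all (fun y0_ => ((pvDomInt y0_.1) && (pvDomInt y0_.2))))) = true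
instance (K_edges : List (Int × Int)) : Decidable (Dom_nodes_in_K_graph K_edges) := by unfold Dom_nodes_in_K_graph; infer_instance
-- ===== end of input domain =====

-- B replaces A's comparison sort of the degree table + break-filter by a degree->nodes bucket
-- table scanned from the maximum degree down to 3 (objective: alternative decomposition).

-- ===== PORT A =====
-- the 'for node in nodes_sorted: if … append else break' loop ('break' = stop and return acc);
-- nodes_sorted[node] is ported as getD (the key is always present: we iterate the dict's own keys)
def pvLoopA (d : PySem.Dict Int Int) : List Int → List Int → List Int
  | [], acc => acc
  | k :: ks, acc => if d.getD k 0 > 2 then pvLoopA d ks (acc ++ [k]) else acc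

def nodes_in_K_graph (K_edges : List (Int × Int)) : List Int :=
  let nodes0 : PySem.Dict Int Int :=
    K_edges.foldl (fun d e => (d.insert e.1 0).insert e.2 0) PySem.Dict.empty
  let nodes : PySem.Dict Int Int :=
    K_edges.foldl (fun d e => (d.modify e.1 0 (· + 1)).modify e.2 0 (· + 1)) nodes0
  let nodes_sorted : PySem.Dict Int Int :=
    PySem.Dict.mk (PySem.List.sorted nodes.items (fun p => p.2) true)
  pvLoopA nodes_sorted nodes_sorted.keys []

-- ===== PORT B =====
def nodes_in_K_graph_alt (K_edges : List (Int × Int)) : List Int :=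
  let deg : PySem.Dict Int Int :=
    K_edges.foldl (fun d e =>
      let d1 := d.insert e.1 (d.getD e.1 0 + 1)
      d1.insert e.2 (d1.getD e.2 0 + 1)) PySem.Dict.empty
  if deg.items = [] then []
  else
    let buckets : PySem.Dict Int (List Int) :=
      deg.items.foldl (fun b p => b.modify p.2 [] (· ++ [p.1])) PySem.Dict.empty
    match PySem.List.max? buckets.keys (fun x => x) with
    | none => []
    | some m => (PySem.List.pyRange m 2 (-1)).foldl (fun acc d => acc ++ buckets.getD d []) []

-- ===== PRECONDITION & SPEC =====
def Spec_nodes_in_K_graph (K_edges : List (Int × Int)) (out : List Int) : Prop := out = nodes_in_K_graph_alt K_edges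
instance (K_edges : List (Int × Int)) (out : List Int) : Decidable (Spec_nodes_in_K_graph K_edges out) := by unfold Spec_nodes_in_K_graph; infer_instance

-- ===== CLAIM (what is proved, stated in full; the proofs are below) =====
def Claim_equal_nodes_in_K_graph : Prop := ∀ (K_edges : List (Int × Int)), Dom_nodes_in_K_graph K_edges → Spec_nodes_in_K_graph K_edges (nodes_in_K_graph K_edges)

-- ===== LEMMAS AND PROOFS =====

def pvL (K : List (Int × Int)) : List Int := K.flatMap (fun e => [e.1, e.2])

def pvN (K : List (Int × Int)) : List Int := PySem.Set.ofList (pvL K)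

def pvIt (K : List (Int × Int)) : List (Int × Int) :=
  (pvN K).map (fun k => (k, (List.count k (pvL K) : Int)))

def pvInsertVal (k : Int) : List Int → List Int
  | [] => [k]
  | d :: D => if k < d then d :: pvInsertVal k D else if d = k then d :: D else k :: d :: D

theorem pv_insertBy_append_left (bef : (Int × Int) → (Int × Int) → Bool) (x : Int × Int)
    (A C : List (Int × Int)) (h : ∀ y ∈ A, bef x y = false) :
    PySem.List.insertBy bef x (A ++ C) = A ++ PySem.List.insertBy bef x C := by
  induction A with
  | nil => simp
  | cons a A ih =>
    simp only [List.cons_append, PySem.List.insertBy, h a (by simp)]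
    simp only [Bool.false_eq_true, if_false, List.cons.injEq, true_and]
    exact ih (fun y hy => h y (by simp [hy]))

theorem pv_insertBy_front (bef : (Int × Int) → (Int × Int) → Bool) (x : Int × Int)
    (l : List (Int × Int)) (h : ∀ y ∈ l, bef x y = true) :
    PySem.List.insertBy bef x l = x :: l := by
  cases l with
  | nil => rfl
  | cons a l => simp [PySem.List.insertBy, h a (by simp)]

theorem pv_insertVal_of_mem {k : Int} {D : List Int} (hD : D.Pairwise (· > ·)) (h : k ∈ D) :
    pvInsertVal k D = D := by
  induction D with
  | nil => simp at h
  | cons d D ih =>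
    rcases List.pairwise_cons.1 hD with ⟨hd, hD'⟩
    rcases List.mem_cons.1 h with rfl | hk
    · simp [pvInsertVal]
    · have : k < d := hd k hk
      simp [pvInsertVal, this, ih hD' hk]

theorem pv_insertVal_mem {k : Int} {D : List Int} (v : Int) :
    v ∈ pvInsertVal k D ↔ v ∈ D ∨ v = k := by
  induction D with
  | nil => simp [pvInsertVal, eq_comm]
  | cons d D ih =>
    by_cases h1 : k < d
    · simp only [pvInsertVal, if_pos h1, List.mem_cons, ih]; tauto
    · by_cases h2 : d = k
      · rw [pvInsertVal, if_neg h1, if_pos h2]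
        simp only [List.mem_cons, h2]; tauto
      · simp only [pvInsertVal, if_neg h1, if_neg h2, List.mem_cons]; tauto

theorem pv_insertVal_pairwise {k : Int} {D : List Int} (hD : D.Pairwise (· > ·)) :
    (pvInsertVal k D).Pairwise (· > ·) := by
  induction D with
  | nil => simp [pvInsertVal]
  | cons d D ih =>
    rcases List.pairwise_cons.1 hD with ⟨hd, hD'⟩
    by_cases h1 : k < d
    · simp only [pvInsertVal, if_pos h1]
      refine List.pairwise_cons.2 ⟨?_, ih hD'⟩
      intro v hv
      rcases (pv_insertVal_mem v).1 hv with hv' | rfl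
      · exact hd v hv'
      · exact h1
    · by_cases h2 : d = k
      · simpa [pvInsertVal, if_neg h1, h2] using hD
      · simp only [pvInsertVal, if_neg h1, if_neg h2]
        refine List.pairwise_cons.2 ⟨?_, hD⟩
        intro v hv
        rcases List.mem_cons.1 hv with rfl | hv'
        · omega
        · have := hd v hv'; omega

theorem pv_insertVal_perm {k : Int} {D : List Int} (h : k ∉ D) :
    (pvInsertVal k D).Perm (D ++ [k]) := by
  induction D with
  | nil => simp [pvInsertVal]
  | cons d D ih =>
    simp only [List.mem_cons, not_or] at h
    by_cases h1 : k < d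
    · simp only [pvInsertVal, if_pos h1, List.cons_append]
      exact (ih h.2).cons d
    · simp only [pvInsertVal, if_neg h1,
        if_neg (show ¬ d = k from fun hh => h.1 hh.symm), List.cons_append]
      exact (List.perm_append_singleton _ _).symm

theorem pv_ins (x : Int × Int) (D : List Int) (F : Int → List (Int × Int))
    (hD : D.Pairwise (· > ·)) (hF : ∀ v ∈ D, ∀ p ∈ F v, p.2 = v)
    (hE : x.2 ∉ D → F x.2 = []) :
    PySem.List.insertBy (fun a b => decide (b.2 < a.2)) x (D.flatMap F) =
      (pvInsertVal x.2 D).flatMap (fun v => if v = x.2 then F v ++ [x] else F v) := by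
  induction D with
  | nil =>
    simp only [List.flatMap_nil, pvInsertVal, List.flatMap_cons, List.flatMap_nil,
      hE (by simp), List.nil_append, List.append_nil]
    rfl
  | cons d D ih =>
    rcases List.pairwise_cons.1 hD with ⟨hd, hD'⟩
    simp only [List.flatMap_cons]
    by_cases h1 : x.2 < d
    · -- x goes after bucket d
      rw [pv_insertBy_append_left _ _ _ _ (fun y hy => by
        have := hF d (by simp) y hy
        simp [this]; omega)]
      rw [ih hD' (fun v hv p hp => hF v (by simp [hv]) p hp)
        (fun hnm => hE (by simp only [List.mem_cons, not_or]; exact ⟨by omega, hnm⟩))]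
      rw [pvInsertVal, if_pos h1]
      simp only [List.flatMap_cons, if_neg (show ¬ d = x.2 by omega)]
    · by_cases h2 : d = x.2
      · -- x appended at the end of bucket d
        subst h2
        rw [pv_insertBy_append_left _ _ _ _ (fun y hy => by
          have := hF x.2 (by simp) y hy
          simp [this])]
        have hlt : ∀ y ∈ D.flatMap F, y.2 < x.2 := by
          intro y hy
          rcases List.mem_flatMap.1 hy with ⟨v, hv, hyv⟩
          rw [hF v (by simp [hv]) y hyv]
          exact hd v hv
        rw [pv_insertBy_front _ _ _ (fun y hy => by simp [hlt y hy])]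
        rw [pvInsertVal, if_neg h1, if_pos rfl]
        simp only [List.flatMap_cons]
        have hcongr : D.flatMap (fun v => if v = x.2 then F v ++ [x] else F v) = D.flatMap F :=
          List.flatMap_congr (fun v hv => by
            rw [if_neg (show ¬ v = x.2 by have := hd v hv; omega)])
        rw [hcongr]
        simp
      · -- new bucket in front
        have hgt : d < x.2 := by omega
        have hlt : ∀ y ∈ F d ++ D.flatMap F, y.2 < x.2 := by
          intro y hy
          rcases List.mem_append.1 hy with hy | hy
          · rw [hF d (by simp) y hy]; exact hgt
          · rcases List.mem_flatMap.1 hy with ⟨v, hv, hyv⟩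
            rw [hF v (by simp [hv]) y hyv]
            have := hd v hv; omega
        rw [pv_insertBy_front _ _ _ (fun y hy => by simp [hlt y hy])]
        rw [pvInsertVal, if_neg h1, if_neg h2]
        have hEx : F x.2 = [] := hE (by
          simp only [List.mem_cons, not_or]
          refine ⟨fun hh => h2 hh.symm, fun hm => ?_⟩
          have := hd _ hm; omega)
        simp only [List.flatMap_cons, hEx, List.nil_append]
        have hcongr : D.flatMap (fun v => if v = x.2 then F v ++ [x] else F v) = D.flatMap F :=
          List.flatMap_congr (fun v hv => by
            rw [if_neg (show ¬ v = x.2 by have := hd v hv; omega)])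
        rw [hcongr, if_neg (show ¬ d = x.2 from h2)]
        simp

theorem pv_sortedDesc_pairwise (vs : List Int) :
    (PySem.List.sorted (PySem.Set.ofList vs) (fun x => x) true).Pairwise (· > ·) := by
  have h1 := PySem.List.sorted_pairwise_rev (PySem.Set.ofList vs) (fun x => x)
  have h2 : (PySem.List.sorted (PySem.Set.ofList vs) (fun x => x) true).Nodup :=
    (PySem.List.sorted_perm _ _ _).nodup_iff.2 (PySem.Set.nodup_ofList vs)
  exact (h1.and h2).imp (fun h => by omega)

theorem pv_sort_buckets (l : List (Int × Int)) :
    PySem.List.sorted l (fun p => p.2) true =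
      (PySem.List.sorted (PySem.Set.ofList (l.map (fun p => p.2))) (fun x => x) true).flatMap
        (fun v => l.filter (fun p => decide (p.2 = v))) := by
  induction l using List.reverseRecOn with
  | nil => simp [PySem.List.sorted]
  | append_singleton l x ih =>
    rw [PySem.List.sorted_rev_eq_foldl_insertBy, List.foldl_append]
    simp only [List.foldl_cons, List.foldl_nil]
    rw [← PySem.List.sorted_rev_eq_foldl_insertBy, ih]
    set V := PySem.Set.ofList (l.map (fun p => p.2)) with hV
    set D := PySem.List.sorted V (fun x => x) true with hDdef
    have hDpw : D.Pairwise (· > ·) := pv_sortedDesc_pairwise _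
    have hmemD : ∀ v, v ∈ D ↔ v ∈ l.map (fun p => p.2) := by
      intro v
      rw [hDdef, PySem.List.mem_sorted, hV, PySem.Set.mem_ofList]
    rw [pv_ins x D _ hDpw
      (fun v hv p hp => by simpa using (List.mem_filter.1 hp).2)
      (fun hnm => by
        rw [List.filter_eq_nil_iff]
        intro p hp hdec
        exact hnm ((hmemD _).2 (by simp only [List.mem_map]; exact ⟨p, hp, by simpa using hdec⟩)))]
    -- now identify value lists and buckets
    have hVx : PySem.Set.ofList ((l ++ [x]).map (fun p => p.2)) = PySem.Set.add V x.2 := by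
      rw [List.map_append, hV, PySem.Set.ofList_eq_foldl, PySem.Set.ofList_eq_foldl,
        List.foldl_append]
      rfl
    have hDx : PySem.List.sorted (PySem.Set.ofList ((l ++ [x]).map (fun p => p.2))) (fun x => x) true
        = pvInsertVal x.2 D := by
      rw [hVx]
      by_cases hmem : x.2 ∈ V
      · have : PySem.Set.add V x.2 = V := by
          unfold PySem.Set.add
          rw [if_pos ((PySem.Set.contains_iff V x.2).2 hmem)]
        rw [this, ← hDdef, pv_insertVal_of_mem hDpw]
        rw [hDdef, PySem.List.mem_sorted]; exact hmem
      · have hadd : PySem.Set.add V x.2 = V ++ [x.2] := by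
          unfold PySem.Set.add
          rw [if_neg (by rw [PySem.Set.contains_iff]; exact hmem)]
        rw [hadd]
        have hnotD : x.2 ∉ D := by rw [hDdef, PySem.List.mem_sorted]; exact hmem
        refine PySem.List.sorted_rev_eq_of_perm_of_pairwise_gt _ _ _ ?_ ?_
        · exact (pv_insertVal_perm hnotD).trans
            (List.Perm.append_right [x.2] (PySem.List.sorted_perm _ _ _))
        · exact pv_insertVal_pairwise hDpw
    rw [hDx]
    refine List.flatMap_congr (fun v hv => ?_)
    by_cases hvx : v = x.2
    · subst hvx
      rw [if_pos rfl, List.filter_append]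
      simp
    · rw [if_neg hvx, List.filter_append]
      have : [x].filter (fun p => decide (p.2 = v)) = [] := by
        have : decide (x.2 = v) = false := by
          simp only [decide_eq_false_iff_not]
          exact fun h => hvx h.symm
        simp [List.filter, this]
      rw [this, List.append_nil]

theorem pv_takeWhile_append_all {α : Type} (p : α → Bool) (l₁ l₂ : List α)
    (h : ∀ a ∈ l₁, p a = true) :
    (l₁ ++ l₂).takeWhile p = l₁ ++ l₂.takeWhile p := by
  induction l₁ with
  | nil => simp
  | cons a l ih =>
    simp [h a (by simp), ih (fun b hb => h b (by simp [hb]))]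

theorem pv_takeWhile_buckets (D : List Int) (F : Int → List (Int × Int))
    (hD : D.Pairwise (· > ·)) (hF : ∀ v ∈ D, ∀ p ∈ F v, p.2 = v)
    (hne : ∀ v ∈ D, F v ≠ []) :
    (D.flatMap F).takeWhile (fun p => decide (p.2 > 2)) =
      (D.takeWhile (fun v => decide (v > 2))).flatMap F := by
  induction D with
  | nil => simp
  | cons d D ih =>
    rcases List.pairwise_cons.1 hD with ⟨hd, hD'⟩
    simp only [List.flatMap_cons, List.takeWhile_cons]
    by_cases h2 : d > 2
    · rw [pv_takeWhile_append_all _ _ _ (fun a ha => by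
        rw [hF d (by simp) a ha]; simpa using h2)]
      rw [ih hD' (fun v hv q hq => hF v (by simp [hv]) q hq) (fun v hv => hne v (by simp [hv]))]
      rw [if_pos (by simpa using h2), List.flatMap_cons]
    · rcases List.exists_cons_of_ne_nil (hne d (by simp)) with ⟨p, ps, hps⟩
      have hp2 : p.2 = d := hF d (by simp) p (by simp [hps])
      have hdec : decide (p.2 > 2) = false := by
        simp only [decide_eq_false_iff_not]; omega
      have hq : decide (d > 2) = false := by
        simp only [decide_eq_false_iff_not]; omega
      rw [hps]
      simp only [List.cons_append, List.takeWhile_cons, hdec, hq]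
      simp

theorem pv_loopA (S₂ : List (Int × Int)) : ∀ (S₁ : List (Int × Int)) (acc : List Int),
    ((S₁ ++ S₂).map (fun p => p.1)).Nodup →
    pvLoopA (PySem.Dict.mk (S₁ ++ S₂)) (S₂.map (fun p => p.1)) acc =
      acc ++ (S₂.takeWhile (fun p => decide (p.2 > 2))).map (fun p => p.1) := by
  induction S₂ with
  | nil => intro S₁ acc h; simp [pvLoopA]
  | cons p S₂ ih =>
    intro S₁ acc h
    have hget : (PySem.Dict.mk (S₁ ++ p :: S₂)).getD p.1 0 = p.2 := by
      refine PySem.Dict.getD_of_mem_items _ ?_ ?_ 0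
      · show (p.1, p.2) ∈ S₁ ++ p :: S₂
        simp
      · rw [PySem.Dict.keys_mk]; exact h
    simp only [List.map_cons, pvLoopA, hget, List.takeWhile_cons]
    by_cases h2 : p.2 > 2
    · rw [if_pos h2]
      have := ih (S₁ ++ [p]) (acc ++ [p.1]) (by simpa using h)
      simp only [List.append_assoc, List.singleton_append] at this
      rw [this]
      have hq : decide (p.2 > 2) = true := by simpa using h2
      simp [hq]
    · rw [if_neg h2]
      have hq : decide (p.2 > 2) = false := by simp only [decide_eq_false_iff_not]; omega
      simp [hq]

theorem pv_mem_pyRange_neg_one (a b x : Int) :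
    x ∈ PySem.List.pyRange a b (-1) ↔ b < x ∧ x ≤ a := by
  rw [PySem.List.pyRange_neg_one]
  simp only [List.mem_map, List.mem_range]
  constructor
  · rintro ⟨k, hk, rfl⟩; omega
  · rintro ⟨h1, h2⟩; exact ⟨(a - x).toNat, by omega, by omega⟩

theorem pv_pyRange_neg_one_pairwise (a b : Int) :
    (PySem.List.pyRange a b (-1)).Pairwise (· > ·) := by
  rw [PySem.List.pyRange_neg_one]
  refine List.Pairwise.map _ (fun i j (h : i < j) => by omega) ?_
  exact List.pairwise_lt_range

theorem pv_flatMap_filter (p : Int → Bool) (F : Int → List Int) (l : List Int)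
    (h : ∀ v ∈ l, p v = false → F v = []) :
    l.flatMap F = (l.filter p).flatMap F := by
  induction l with
  | nil => rfl
  | cons a l ih =>
    by_cases hp : p a
    · simp [hp, ih (fun v hv => h v (by simp [hv]))]
    · simp only [Bool.not_eq_true] at hp
      simp [hp, h a (by simp) hp, ih (fun v hv => h v (by simp [hv]))]

theorem pv_desc_ext {l₁ l₂ : List Int} (h₁ : l₁.Pairwise (· > ·)) (h₂ : l₂.Pairwise (· > ·))
    (h : ∀ x, x ∈ l₁ ↔ x ∈ l₂) : l₁ = l₂ := by
  have n₁ : l₁.Nodup := h₁.imp (fun h => by omega)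
  have n₂ : l₂.Nodup := h₂.imp (fun h => by omega)
  have hp : l₁.Perm l₂ := by
    refine List.perm_of_nodup_nodup_toFinset_eq n₁ n₂ ?_
    ext x; simp [List.mem_toFinset, h x]
  exact hp.eq_of_pairwise (fun a b _ _ hab hba => by omega) h₁ h₂

theorem pv_mem_takeWhile_desc {D : List Int} (hD : D.Pairwise (· > ·)) (v : Int) :
    v ∈ D.takeWhile (fun v => decide (v > 2)) ↔ v ∈ D ∧ v > 2 := by
  induction D with
  | nil => simp
  | cons d D ih =>
    rcases List.pairwise_cons.1 hD with ⟨hd, hD'⟩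
    by_cases h2 : d > 2
    · simp only [List.takeWhile_cons, decide_eq_true_eq, if_pos h2, List.mem_cons, ih hD']
      constructor
      · rintro (rfl | ⟨hv, h⟩) <;> simp_all
      · rintro ⟨rfl | hv, h⟩ <;> simp_all
    · rw [List.takeWhile_cons]
      simp only [decide_eq_true_eq, if_neg h2, List.mem_cons]
      constructor
      · rintro ⟨⟩
      · rintro ⟨rfl | hv, h⟩
        · omega
        · exact absurd (hd v hv) (by omega)

theorem pv_foldl_two {β : Type} (K : List (Int × Int)) (g : β → Int → β) (init : β) :
    K.foldl (fun d e => g (g d e.1) e.2) init = (pvL K).foldl g init := by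
  rw [pvL, List.foldl_flatMap]; rfl

theorem pv_getD_insert_zero (l : List Int) : ∀ (d : PySem.Dict Int Int) (k : Int),
    d.getD k 0 = 0 → (l.foldl (fun d x => d.insert x (0 : Int)) d).getD k 0 = 0 := by
  induction l with
  | nil => intro d k h; simpa using h
  | cons a l ih =>
    intro d k h
    simp only [List.foldl_cons]
    refine ih _ _ ?_
    rw [PySem.Dict.getD_insert]
    split_ifs <;> simp [h]

theorem pv_update_nil (L : List Int) : PySem.Set.update [] L = PySem.Set.ofList L := by
  rw [PySem.Set.ofList_eq_foldl]; rfl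

theorem pv_update_of_subset (L : List Int) : ∀ (s : PySem.Set Int), (∀ x ∈ L, x ∈ s) →
    PySem.Set.update s L = s := by
  induction L with
  | nil => intro s h; rfl
  | cons a L ih =>
    intro s h
    show PySem.Set.update (PySem.Set.add s a) L = s
    have : PySem.Set.add s a = s := by
      unfold PySem.Set.add
      rw [if_pos ((PySem.Set.contains_iff s a).2 (h a (by simp)))]
    rw [this]
    exact ih s (fun x hx => h x (by simp [hx]))

theorem pv_dictA_items (K : List (Int × Int)) :
    (K.foldl (fun d e => (d.modify e.1 0 (· + 1)).modify e.2 0 (· + 1))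
      (K.foldl (fun d e => (d.insert e.1 0).insert e.2 0) PySem.Dict.empty)).items = pvIt K := by
  rw [show K.foldl (fun d e => (d.insert e.1 0).insert e.2 0) PySem.Dict.empty
      = (pvL K).foldl (fun d x => d.insert x (0 : Int)) PySem.Dict.empty from
    pv_foldl_two K (fun d x => d.insert x (0 : Int)) PySem.Dict.empty]
  rw [show K.foldl (fun d e => (d.modify e.1 0 (· + 1)).modify e.2 0 (· + 1))
        ((pvL K).foldl (fun d x => d.insert x (0 : Int)) PySem.Dict.empty)
      = (pvL K).foldl (fun d x => d.modify x 0 (· + 1))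
        ((pvL K).foldl (fun d x => d.insert x (0 : Int)) PySem.Dict.empty) from
    pv_foldl_two K (fun (d : PySem.Dict Int Int) (x : Int) => d.modify x 0 (· + 1)) _]
  set d0 := (pvL K).foldl (fun d x => d.insert x (0 : Int)) PySem.Dict.empty with hd0
  set d1 := (pvL K).foldl (fun d x => d.modify x 0 (· + 1)) d0 with hd1
  have hk0 : d0.keys = pvN K := by
    rw [hd0, PySem.Dict.keys_foldl_insert, PySem.Dict.keys_empty, pv_update_nil, pvN]
  have hk1 : d1.keys = pvN K := by
    rw [hd1, PySem.Dict.keys_foldl_modify, hk0]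
    exact pv_update_of_subset _ _ (fun x hx => by
      rw [pvN, PySem.Set.mem_ofList]; exact hx)
  have hnd : d1.keys.Nodup := by rw [hk1]; exact PySem.Set.nodup_ofList _
  rw [PySem.Dict.items_eq_map_keys d1 hnd 0, hk1, pvIt]
  refine List.map_congr_left (fun k hk => ?_)
  have : d1.getD k 0 = 0 + List.count k (pvL K) := by
    rw [hd1]
    have := PySem.Dict.getD_foldl_modify_add_one (pvL K) d0 k
    rw [this, pv_getD_insert_zero _ _ _ (by simp [PySem.Dict.getD_empty])]
  simp [this]

theorem pv_dictB_items (K : List (Int × Int)) :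
    (K.foldl (fun d e =>
      let d1 := d.insert e.1 (d.getD e.1 0 + 1)
      d1.insert e.2 (d1.getD e.2 0 + 1)) PySem.Dict.empty).items = pvIt K := by
  show ((K.foldl (fun d e => ((d.insert e.1 (d.getD e.1 0 + 1)).insert e.2
      ((d.insert e.1 (d.getD e.1 0 + 1)).getD e.2 0 + 1))) PySem.Dict.empty)).items = pvIt K
  rw [pv_foldl_two K (fun (d : PySem.Dict Int Int) (x : Int) => d.insert x (d.getD x 0 + 1))
    PySem.Dict.empty]
  set d1 : PySem.Dict Int Int := (pvL K).foldl (fun d x => d.insert x (d.getD x 0 + 1)) PySem.Dict.empty with hd1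
  have hk1 : d1.keys = pvN K := by
    rw [hd1, PySem.Dict.keys_foldl_insert, PySem.Dict.keys_empty, pv_update_nil, pvN]
  have hnd : d1.keys.Nodup := by rw [hk1]; exact PySem.Set.nodup_ofList _
  rw [PySem.Dict.items_eq_map_keys d1 hnd 0, hk1, pvIt]
  refine List.map_congr_left (fun k hk => ?_)
  have : d1.getD k 0 = 0 + List.count k (pvL K) := by
    rw [hd1, PySem.Dict.getD_foldl_insert_add_one, PySem.Dict.getD_empty]
  simp [this]

def pvDictB (K : List (Int × Int)) : PySem.Dict Int Int :=
  K.foldl (fun d e =>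
    let d1 := d.insert e.1 (d.getD e.1 0 + 1)
    d1.insert e.2 (d1.getD e.2 0 + 1)) PySem.Dict.empty
def pvBuckets (l : List (Int × Int)) : PySem.Dict Int (List Int) :=
  l.foldl (fun b p => b.modify p.2 [] (· ++ [p.1])) PySem.Dict.empty
theorem pv_alt_eq (K : List (Int × Int)) : nodes_in_K_graph_alt K =
    if (pvDictB K).items = [] then []
    else
      match PySem.List.max? (pvBuckets (pvDictB K).items).keys (fun x => x) with
      | none => []
      | some m => (PySem.List.pyRange m 2 (-1)).foldl
          (fun acc d => acc ++ (pvBuckets (pvDictB K).items).getD d []) [] := rfl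
theorem pv_dictB_items' (K : List (Int × Int)) : (pvDictB K).items = pvIt K := pv_dictB_items K
theorem pv_buckets_keys (l : List (Int × Int)) :
    (pvBuckets l).keys = PySem.Set.ofList (l.map (fun p => p.2)) := by
  rw [pvBuckets, PySem.Dict.keys_foldl_modify_key l (fun p => p.2) [] (fun b p => fun cur => cur ++ [p.1]),
    PySem.Dict.keys_empty, pv_update_nil]
theorem pv_buckets_getD (l : List (Int × Int)) (v : Int) :
    (pvBuckets l).getD v [] = (l.filter (fun p => p.2 == v)).map (fun p => p.1) := by
  rw [pvBuckets, show l.foldl (fun b p => b.modify p.2 [] (· ++ [p.1])) PySem.Dict.empty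
      = (l.map (fun p => (p.2, p.1))).foldl (fun b q => b.modify q.1 [] (· ++ [q.2]))
        PySem.Dict.empty from by rw [List.foldl_map]]
  rw [PySem.Dict.getD_foldl_modify_append]
  simp only [List.filter_map, List.map_map]
  rfl

theorem pv_main (K : List (Int × Int)) : nodes_in_K_graph K = nodes_in_K_graph_alt K := by
  by_cases hKnil : K = []
  · subst hKnil; decide
  · rcases List.exists_cons_of_ne_nil hKnil with ⟨e, K', hK⟩
    have hItne : pvIt K ≠ [] := by
      have he : e.1 ∈ pvN K := by
        rw [pvN, PySem.Set.mem_ofList, pvL]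
        exact List.mem_flatMap.2 ⟨e, by simp [hK], by simp⟩
      intro h
      rw [pvIt] at h
      have h0 := List.map_eq_nil_iff.1 h
      rw [h0] at he; simp at he
    -- names
    set it : List (Int × Int) := pvIt K with hit
    set V : List Int := PySem.Set.ofList (it.map (fun p => p.2)) with hV
    set D : List Int := PySem.List.sorted V (fun x => x) true with hD
    set F : Int → List (Int × Int) := fun v => it.filter (fun p => decide (p.2 = v)) with hF
    have hDpw : D.Pairwise (· > ·) := pv_sortedDesc_pairwise _
    have hmemD : ∀ v, v ∈ D ↔ v ∈ it.map (fun p => p.2) := fun v => by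
      rw [hD, PySem.List.mem_sorted, hV, PySem.Set.mem_ofList]
    have hFmem : ∀ v ∈ D, ∀ p ∈ F v, p.2 = v := fun v _ p hp => by
      simpa using (List.mem_filter.1 hp).2
    have hFne : ∀ v ∈ D, F v ≠ [] := by
      intro v hv
      rcases List.mem_map.1 ((hmemD v).1 hv) with ⟨p, hp, hpv⟩
      intro hnil
      rw [hF, List.filter_eq_nil_iff] at hnil
      exact hnil p hp (by simpa using hpv)
    -- ===== A side =====
    have hA : nodes_in_K_graph K =
        ((D.takeWhile (fun v => decide (v > 2))).flatMap F).map (fun p => p.1) := by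
      show pvLoopA ((PySem.Dict.mk (PySem.List.sorted
          (K.foldl (fun d e => (d.modify e.1 0 (· + 1)).modify e.2 0 (· + 1))
            (K.foldl (fun d e => (d.insert e.1 0).insert e.2 0) PySem.Dict.empty)).items
          (fun p => p.2) true) : PySem.Dict Int Int))
        ((PySem.Dict.mk (PySem.List.sorted
          (K.foldl (fun d e => (d.modify e.1 0 (· + 1)).modify e.2 0 (· + 1))
            (K.foldl (fun d e => (d.insert e.1 0).insert e.2 0) PySem.Dict.empty)).items
          (fun p => p.2) true) : PySem.Dict Int Int)).keys [] = _
      rw [pv_dictA_items, ← hit]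
      set S : List (Int × Int) := PySem.List.sorted it (fun p => p.2) true with hS
      have hnodup : (S.map (fun p => p.1)).Nodup := by
        have hperm : S.Perm it := PySem.List.sorted_perm _ _ _
        have : (it.map (fun p => p.1)).Nodup := by
          rw [hit, pvIt, List.map_map]
          have : ((fun p : Int × Int => p.1) ∘ (fun k => (k, (List.count k (pvL K) : Int))))
              = fun k => k := rfl
          rw [this, List.map_id']
          exact PySem.Set.nodup_ofList _
        exact ((hperm.map (fun p => p.1)).nodup_iff).2 this
      rw [PySem.Dict.keys_mk]
      have := pv_loopA S [] [] (by simpa using hnodup)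
      simp only [List.nil_append] at this
      rw [this]
      rw [hS, pv_sort_buckets, ← hV, ← hD, ← hF]
      rw [pv_takeWhile_buckets D F hDpw hFmem hFne]
    -- ===== B side =====
    rcases (by
      cases hmx : PySem.List.max? V (fun x => x) with
      | none =>
        exfalso
        rcases List.exists_cons_of_ne_nil hItne with ⟨p, it', hit'⟩
        have hpV : p.2 ∈ V := by
          rw [hV, PySem.Set.mem_ofList]
          exact List.mem_map.2 ⟨p, by rw [hit']; simp, rfl⟩
        rw [(PySem.List.max?_eq_none_iff V (fun x => x)).1 hmx] at hpV
        simp at hpV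
      | some m => exact ⟨m, rfl⟩ :
      ∃ m, PySem.List.max? V (fun x => x) = some m) with ⟨m, hmx⟩
    have hB : nodes_in_K_graph_alt K =
        (PySem.List.pyRange m 2 (-1)).flatMap
          (fun v => (F v).map (fun p => p.1)) := by
      rw [pv_alt_eq K, pv_dictB_items', ← hit]
      rw [if_neg hItne, pv_buckets_keys, ← hV, hmx]
      show (PySem.List.pyRange m 2 (-1)).foldl
          (fun acc d => acc ++ (pvBuckets it).getD d []) [] = _
      rw [PySem.List.foldl_append_eq_flatMap, List.nil_append]
      refine List.flatMap_congr (fun v _ => ?_)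
      rw [pv_buckets_getD, hF]
      refine congrArg _ (List.filter_congr (fun p _ => ?_))
      rfl
    -- ===== convergence =====
    have hm_max : ∀ v ∈ V, v ≤ m := fun v hv => PySem.List.max?_isMax hmx v hv
    have hFnil : ∀ v, v ∉ V → F v = [] := by
      intro v hv
      rw [hF, List.filter_eq_nil_iff]
      intro p hp hdec
      refine hv ?_
      rw [hV, PySem.Set.mem_ofList]
      exact List.mem_map.2 ⟨p, hp, by simpa using hdec⟩
    have hstep1 : (PySem.List.pyRange m 2 (-1)).flatMap (fun v => (F v).map (fun p => p.1))
        = ((PySem.List.pyRange m 2 (-1)).filter (fun v => decide (v ∈ V))).flatMap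
            (fun v => (F v).map (fun p => p.1)) :=
      pv_flatMap_filter _ _ _ (fun v _ hfalse => by
        rw [hFnil v (by simpa using hfalse)]
        rfl)
    have hlist : (PySem.List.pyRange m 2 (-1)).filter (fun v => decide (v ∈ V))
        = D.takeWhile (fun v => decide (v > 2)) := by
      refine pv_desc_ext ((pv_pyRange_neg_one_pairwise m 2).filter _)
        (List.Pairwise.sublist (List.takeWhile_sublist _) hDpw) (fun x => ?_)
      rw [List.mem_filter, pv_mem_pyRange_neg_one, pv_mem_takeWhile_desc hDpw]
      have hxD : x ∈ D ↔ x ∈ V := by rw [hD, PySem.List.mem_sorted]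
      constructor
      · rintro ⟨⟨h2, hm⟩, hxV⟩
        exact ⟨hxD.2 (by simpa using hxV), h2⟩
      · rintro ⟨hxDm, h2⟩
        have hxV : x ∈ V := hxD.1 hxDm
        exact ⟨⟨h2, hm_max x hxV⟩, by simpa using hxV⟩
    rw [hA, hB, hstep1, hlist, List.map_flatMap]

-- ===== VERDICT (by name: the statement is the Claim_ definition above) =====
theorem nodes_in_K_graph_spec : Claim_equal_nodes_in_K_graph := by
  intro K_edges _
  unfold Spec_nodes_in_K_graph
  exact pv_main K_edges
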